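-- pv_equiv track=rewrite | github.com/EibaKatsu/life_advisor | scripts/generate_household_report.py | render_monthly_integrated_table
-- ===== SOURCE A (Python) =====
-- def format_yen(value: int) -> str:
--     return f"{value:,}"
--
-- def render_monthly_integrated_table(
--     bank_monthly: dict[str, dict[str, int]],
--     monthly_split: dict[str, dict[str, int]],
-- ) -> list[str]:
--     lines = [
--         "| 月 | 入金(円) | 口座支出(円) | 収支(円) | 主要ドライバー(円) | 特別支出(円) | 分析支出合計(円) |",
--         "|---|---:|---:|---:|---:|---:|---:|",
--     ]
--     total_in = 0
--     total_out = 0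
--     total_net = 0
--     total_driver = 0
--     total_special = 0
--     total_analysis = 0
--
--     months = sorted(set(bank_monthly.keys()) | set(monthly_split.keys()))
--     for ym in months:
--         income = bank_monthly.get(ym, {}).get("in", 0)
--         outflow = bank_monthly.get(ym, {}).get("out", 0)
--         net = income - outflow
--         driver = monthly_split.get(ym, {}).get("driver", 0)
--         special = monthly_split.get(ym, {}).get("special", 0)
--         analysis_total = monthly_split.get(ym, {}).get("total", 0)
--
--         total_in += income
--         total_out += outflow
--         total_net += net
--         total_driver += driver
--         total_special += special
--         total_analysis += analysis_total
--
--         lines.append(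
--             f"| {ym} | {format_yen(income)} | {format_yen(outflow)} | {format_yen(net)} | "
--             f"{format_yen(driver)} | {format_yen(special)} | {format_yen(analysis_total)} |"
--         )
--
--     lines.append(
--         f"| 合計 | {format_yen(total_in)} | {format_yen(total_out)} | {format_yen(total_net)} | "
--         f"{format_yen(total_driver)} | {format_yen(total_special)} | {format_yen(total_analysis)} |"
--     )
--     return lines
-- ===== SOURCE B (Python) =====
-- def format_yen(value: int) -> str:
--     return f"{value:,}"
--
-- def render_monthly_integrated_table(bank_monthly, monthly_split):
--     # Columnar (transposed) construction: build each numeric column as a list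
--     # (per-month values plus its total appended), derive the net column by
--     # element-wise subtraction, then zip the columns back into row strings.
--     months = sorted(set(bank_monthly) | set(monthly_split))
--
--     def column(d, key):
--         vals = [d.get(ym, {}).get(key, 0) for ym in months]
--         return vals + [sum(vals)]
--
--     ins = column(bank_monthly, "in")
--     outs = column(bank_monthly, "out")
--     nets = [i - o for i, o in zip(ins, outs)]
--     drivers = column(monthly_split, "driver")
--     specials = column(monthly_split, "special")
--     totals = column(monthly_split, "total")
--     labels = months + ["合計"]
--
--     return [
--         "| 月 | 入金(円) | 口座支出(円) | 収支(円) | 主要ドライバー(円) | 特別支出(円) | 分析支出合計(円) |",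
--         "|---|---:|---:|---:|---:|---:|---:|",
--     ] + [
--         "| " + " | ".join([lab] + [format_yen(v) for v in nums]) + " |"
--         for lab, *nums in zip(labels, ins, outs, nets, drivers, specials, totals)
--     ]
-- ===== Notes on version B (the rewrite author's own statement) =====
-- stated objective: alternative
-- what changed: B builds the table column-by-column (transposed): each numeric column is a list of per-month values with its own sum appended as the total entry, the net column is an element-wise subtraction of the income and outflow columns, and the rows are produced by zipping the label and six numeric columns back together with ' | '.join — instead of A's row-major loop threading six running accumulators through the formatting.
import Mathlib
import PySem

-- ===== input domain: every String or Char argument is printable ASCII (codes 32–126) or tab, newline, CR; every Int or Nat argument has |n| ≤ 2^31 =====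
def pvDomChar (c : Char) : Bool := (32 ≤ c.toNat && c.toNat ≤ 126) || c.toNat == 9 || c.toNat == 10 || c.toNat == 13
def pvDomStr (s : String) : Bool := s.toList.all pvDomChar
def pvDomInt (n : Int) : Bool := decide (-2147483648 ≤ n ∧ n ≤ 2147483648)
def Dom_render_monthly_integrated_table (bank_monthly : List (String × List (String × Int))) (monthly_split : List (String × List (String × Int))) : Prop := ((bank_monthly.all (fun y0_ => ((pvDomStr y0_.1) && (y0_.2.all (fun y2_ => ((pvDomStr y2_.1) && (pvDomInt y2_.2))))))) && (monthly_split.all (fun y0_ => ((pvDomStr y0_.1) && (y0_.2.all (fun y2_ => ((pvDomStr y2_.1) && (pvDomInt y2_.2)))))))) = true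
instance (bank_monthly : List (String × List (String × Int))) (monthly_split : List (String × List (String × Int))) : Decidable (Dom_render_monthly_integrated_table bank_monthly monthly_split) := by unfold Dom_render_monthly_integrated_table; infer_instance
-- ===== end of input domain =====

-- B replaces A's row-major loop with six threaded accumulators by a columnar (transposed)
-- construction: each numeric column is built as a list with its total appended, the net
-- column is an element-wise subtraction of two columns, and rows come from zipping columns.

-- ===== PORT A =====

-- helper of both Pythons: format_yen = f"{value:,}" (comma-group the decimal digits in threes
-- from the right, '-' prefix for negatives); exact for all Int.
def format_yen_go : Nat → List Char → List Char
  | _, [] => []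
  | n, c :: cs => (if 0 < n && n % 3 == 0 then [','] else []) ++ c :: format_yen_go (n + 1) cs

def format_yen (v : Int) : String :=
  let mag := PySem.Int.toStr (if v < 0 then -v else v)
  (if v < 0 then "-" else "") ++ String.ofList ((format_yen_go 0 mag.toList.reverse).reverse)

-- d.get(ym, {}).get(key, 0), the lookup both Pythons perform
def pvGet2 (d : List (String × List (String × Int))) (ym key : String) : Int :=
  PySem.Dict.getD (PySem.Dict.mk (PySem.Dict.getD (PySem.Dict.mk d) ym [])) key 0

-- sorted(set(bank_monthly.keys()) | set(monthly_split.keys())), identical in both Pythons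
def pvMonths (bank_monthly monthly_split : List (String × List (String × Int))) : List String :=
  PySem.List.sorted
    (PySem.Set.union (PySem.Set.ofList (bank_monthly.map Prod.fst))
      (PySem.Set.ofList (monthly_split.map Prod.fst)))
    (fun x => x) false

def pvHeader : List String :=
  ["| 月 | 入金(円) | 口座支出(円) | 収支(円) | 主要ドライバー(円) | 特別支出(円) | 分析支出合計(円) |",
   "|---|---:|---:|---:|---:|---:|---:|"]

def render_monthly_integrated_table (bank_monthly : List (String × List (String × Int))) (monthly_split : List (String × List (String × Int))) : List String :=
  let months := pvMonths bank_monthly monthly_split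
  let st := months.foldl
    (fun (st : Int × Int × Int × Int × Int × Int × List String) ym =>
      let income := pvGet2 bank_monthly ym "in"
      let outflow := pvGet2 bank_monthly ym "out"
      let net := income - outflow
      let driver := pvGet2 monthly_split ym "driver"
      let special := pvGet2 monthly_split ym "special"
      let analysis_total := pvGet2 monthly_split ym "total"
      (st.1 + income, st.2.1 + outflow, st.2.2.1 + net, st.2.2.2.1 + driver,
       st.2.2.2.2.1 + special, st.2.2.2.2.2.1 + analysis_total,
       st.2.2.2.2.2.2 ++
         ["| " ++ ym ++ " | " ++ format_yen income ++ " | " ++ format_yen outflow ++ " | " ++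
          format_yen net ++ " | " ++ format_yen driver ++ " | " ++ format_yen special ++ " | " ++
          format_yen analysis_total ++ " |"]))
    (0, 0, 0, 0, 0, 0, pvHeader)
  st.2.2.2.2.2.2 ++
    ["| 合計 | " ++ format_yen st.1 ++ " | " ++ format_yen st.2.1 ++ " | " ++
     format_yen st.2.2.1 ++ " | " ++ format_yen st.2.2.2.1 ++ " | " ++
     format_yen st.2.2.2.2.1 ++ " | " ++ format_yen st.2.2.2.2.2.1 ++ " |"]

-- ===== PORT B =====

-- column(d, key): per-month values with their sum appended
def pvColumn (d : List (String × List (String × Int))) (months : List String) (key : String) : List Int :=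
  let vals := months.map (fun ym => pvGet2 d ym key)
  vals ++ [vals.sum]

-- the zip comprehension of Source B: one row string per 7-tuple of column entries
def pvZipRows : List String → List Int → List Int → List Int → List Int → List Int → List Int → List String
  | lab :: ls, a :: as_, b :: bs, c :: cs, d :: ds, e :: es, f :: fs =>
      ("| " ++ PySem.Str.join " | " ([lab] ++ ([a, b, c, d, e, f].map format_yen)) ++ " |")
        :: pvZipRows ls as_ bs cs ds es fs
  | _, _, _, _, _, _, _ => []

def render_monthly_integrated_table_alt (bank_monthly : List (String × List (String × Int))) (monthly_split : List (String × List (String × Int))) : List String :=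
  let months := pvMonths bank_monthly monthly_split
  let ins := pvColumn bank_monthly months "in"
  let outs := pvColumn bank_monthly months "out"
  let nets := List.zipWith (fun i o => i - o) ins outs
  let drivers := pvColumn monthly_split months "driver"
  let specials := pvColumn monthly_split months "special"
  let totals := pvColumn monthly_split months "total"
  let labels := months ++ ["合計"]
  pvHeader ++ pvZipRows labels ins outs nets drivers specials totals

-- ===== PRECONDITION & SPEC =====
def Spec_render_monthly_integrated_table (bank_monthly : List (String × List (String × Int))) (monthly_split : List (String × List (String × Int))) (out : List String) : Prop := out = render_monthly_integrated_table_alt bank_monthly monthly_split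
instance (bank_monthly : List (String × List (String × Int))) (monthly_split : List (String × List (String × Int))) (out : List String) : Decidable (Spec_render_monthly_integrated_table bank_monthly monthly_split out) := by unfold Spec_render_monthly_integrated_table; infer_instance

-- ===== CLAIM (what is proved, stated in full; the proofs are below) =====
def Claim_equal_render_monthly_integrated_table : Prop := ∀ (bank_monthly : List (String × List (String × Int))) (monthly_split : List (String × List (String × Int))), Dom_render_monthly_integrated_table bank_monthly monthly_split → Spec_render_monthly_integrated_table bank_monthly monthly_split (render_monthly_integrated_table bank_monthly monthly_split)

-- ===== LEMMAS AND PROOFS =====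

-- A's row, as plain concatenation
def pvRowA (lab : String) (a b c d e f : Int) : String :=
  "| " ++ lab ++ " | " ++ format_yen a ++ " | " ++ format_yen b ++ " | " ++
  format_yen c ++ " | " ++ format_yen d ++ " | " ++ format_yen e ++ " | " ++
  format_yen f ++ " |"

-- B's joined row equals A's concatenated row
lemma joinRow (lab : String) (a b c d e f : Int) :
    "| " ++ PySem.Str.join " | "
        [lab, format_yen a, format_yen b, format_yen c, format_yen d, format_yen e, format_yen f]
      ++ " |" = pvRowA lab a b c d e f := by
  apply String.toList_injective
  simp [pvRowA, PySem.Chars.join, List.intercalate, List.intersperse]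

-- A's loop, characterised: the six accumulators end at initial value + column sums
-- (the net column summing to Σin − Σout), and the lines end at the prefix plus one
-- formatted row per month.
lemma loopA_eq (bank split : List (String × List (String × Int))) (ms : List String)
    (a b c d e f : Int) (acc : List String) :
    ms.foldl
      (fun (st : Int × Int × Int × Int × Int × Int × List String) ym =>
        let income := pvGet2 bank ym "in"
        let outflow := pvGet2 bank ym "out"
        let net := income - outflow
        let driver := pvGet2 split ym "driver"
        let special := pvGet2 split ym "special"
        let analysis_total := pvGet2 split ym "total"
        (st.1 + income, st.2.1 + outflow, st.2.2.1 + net, st.2.2.2.1 + driver,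
         st.2.2.2.2.1 + special, st.2.2.2.2.2.1 + analysis_total,
         st.2.2.2.2.2.2 ++
           ["| " ++ ym ++ " | " ++ format_yen income ++ " | " ++ format_yen outflow ++ " | " ++
            format_yen net ++ " | " ++ format_yen driver ++ " | " ++ format_yen special ++ " | " ++
            format_yen analysis_total ++ " |"]))
      (a, b, c, d, e, f, acc)
    = (a + (ms.map (fun ym => pvGet2 bank ym "in")).sum,
       b + (ms.map (fun ym => pvGet2 bank ym "out")).sum,
       c + ((ms.map (fun ym => pvGet2 bank ym "in")).sum
            - (ms.map (fun ym => pvGet2 bank ym "out")).sum),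
       d + (ms.map (fun ym => pvGet2 split ym "driver")).sum,
       e + (ms.map (fun ym => pvGet2 split ym "special")).sum,
       f + (ms.map (fun ym => pvGet2 split ym "total")).sum,
       acc ++ ms.map (fun ym =>
         pvRowA ym (pvGet2 bank ym "in") (pvGet2 bank ym "out")
           (pvGet2 bank ym "in" - pvGet2 bank ym "out")
           (pvGet2 split ym "driver") (pvGet2 split ym "special") (pvGet2 split ym "total"))) := by
  induction ms generalizing a b c d e f acc with
  | nil => simp
  | cons ym ms ih =>
    simp only [List.foldl_cons, List.map_cons, List.sum_cons, ih, List.append_assoc,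
      List.cons_append, pvRowA]
    refine congrArg₂ _ (by ring) (congrArg₂ _ (by ring) (congrArg₂ _ (by ring)
      (congrArg₂ _ (by ring) (congrArg₂ _ (by ring) (congrArg₂ _ (by ring) rfl)))))

-- element-wise subtraction of two columns of the same month list
lemma nets_eq (ms : List String) (f g : String → Int) (a b : Int) :
    List.zipWith (fun i o => i - o) (ms.map f ++ [a]) (ms.map g ++ [b])
      = ms.map (fun ym => f ym - g ym) ++ [a - b] := by
  induction ms with
  | nil => simp
  | cons ym ms ih => simp [ih]

-- zipping six aligned columns (per-month values plus a final entry) yields one row per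
-- month followed by the final row
lemma zipRows_eq (ms : List String) (L : String) (f1 f2 f3 f4 f5 f6 : String → Int)
    (a1 a2 a3 a4 a5 a6 : Int) :
    pvZipRows (ms ++ [L]) (ms.map f1 ++ [a1]) (ms.map f2 ++ [a2]) (ms.map f3 ++ [a3])
        (ms.map f4 ++ [a4]) (ms.map f5 ++ [a5]) (ms.map f6 ++ [a6])
      = ms.map (fun ym => pvRowA ym (f1 ym) (f2 ym) (f3 ym) (f4 ym) (f5 ym) (f6 ym))
          ++ [pvRowA L a1 a2 a3 a4 a5 a6] := by
  induction ms with
  | nil => simp [pvZipRows, joinRow]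
  | cons ym ms ih => simp [pvZipRows, joinRow, ih]

-- ===== VERDICT (by name: the statement is the Claim_ definition above) =====
theorem render_monthly_integrated_table_spec : Claim_equal_render_monthly_integrated_table := by
  intro bank split _
  unfold Spec_render_monthly_integrated_table
  unfold render_monthly_integrated_table render_monthly_integrated_table_alt
  simp only [loopA_eq, pvColumn, nets_eq, zipRows_eq, List.append_assoc, zero_add]
  rfl
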